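/- GENERATED by c/gen_decode.py: decode facts of the image, one per distinct instruction byte string. -/
import UserX.DecodeImage

#decode_all ProgX.Base.Dec
  "01e8"  -- add eax,ebp
  "415e"  -- pop r14
  "4881ffe0ff3f00"  -- cmp rdi,0x3fffe0
  "4889c2"  -- mov rdx,rax
  "488b442408"  -- mov rax,QWORD PTR [rsp+0x8]
  "490faff4"  -- imul rsi,r12
  "4c39e3"  -- cmp rbx,r12
  "660f28d0"  -- movapd xmm2,xmm0
  "66480f7ec3"  -- movq rbx,xmm0
  "74e7"  -- je 100221
  "7a02"  -- jp 102cdc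
  "89df"  -- mov edi,ebx
  "bf36000000"  -- mov edi,0x36
  "e87ceeffff"  -- call 1003c0
  "e8e6f8ffff"  -- call 101200
  "ebbf"  -- jmp 103b73
  "f20f111c24"  -- movsd QWORD PTR [rsp],xmm3
  "f20f591503db0300"  -- mulsd xmm2,QWORD PTR [rip+0x3db03]
  "f20f5e151ce00300"  -- divsd xmm2,QWORD PTR [rip+0x3e01c]
  "ffd0"  -- call rax
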